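-- pv_equiv track=rewrite | github.com/dcccc/calculator | calculator/gromacs/mdp_write.py | get_mdp_line
-- ===== SOURCE A (Python) =====
-- def get_mdp_line(gromacs_mdp, indoc):
--
--     base_key_list = [i[0][:-1].strip() for i in gromacs_mdp if len(i) == 2 ]
--     indoc_key = indoc.keys()
--     for n, i in enumerate(gromacs_mdp):
--         if len(i) == 2 and i[0][:-1].strip() in indoc_key:
--             gromacs_mdp[n][1] = indoc[i[0][:-1].strip()]
--
--     mdp_str = [[str(j) for j in i ] for i in gromacs_mdp]
--     mdp_str = ["  ".join(i) for i in mdp_str]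
--
--     not_include = ["{:<23s}  =  {}".format(i, indoc[i]) for i in indoc_key
--                                                         if i not in base_key_list]
--
--     mdp_str = "\n".join(mdp_str + ["\n"] + not_include)
--
--     return(mdp_str)
-- ===== SOURCE B (Python) =====
-- def get_mdp_line(gromacs_mdp, indoc):
--     # Inverted algorithm: index the rows by base key once, then walk indoc,
--     # patching matched rows via the index and collecting unmatched keys as extras.
--     index = {}
--     for n, row in enumerate(gromacs_mdp):
--         if len(row) == 2:
--             index.setdefault(row[0][:-1].strip(), []).append(n)
--     extras = []
--     for key, val in indoc.items():
--         if key in index: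
--             for n in index[key]:
--                 gromacs_mdp[n][1] = val
--         else:
--             extras.append("{:<23s}  =  {}".format(key, val))
--     body = ["  ".join(str(j) for j in row) for row in gromacs_mdp]
--     return "\n".join(body + ["\n"] + extras)
-- ===== Notes on version B (the rewrite author's own statement) =====
-- stated objective: alternative
-- what changed: B inverts the traversal: it builds an index from base key to row positions once, then iterates over indoc (not over the rows), patching the indexed rows and collecting unmatched keys as extras in the same loop, replacing A's row-oriented scans that test each row's key against the dict.
import Mathlib
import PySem

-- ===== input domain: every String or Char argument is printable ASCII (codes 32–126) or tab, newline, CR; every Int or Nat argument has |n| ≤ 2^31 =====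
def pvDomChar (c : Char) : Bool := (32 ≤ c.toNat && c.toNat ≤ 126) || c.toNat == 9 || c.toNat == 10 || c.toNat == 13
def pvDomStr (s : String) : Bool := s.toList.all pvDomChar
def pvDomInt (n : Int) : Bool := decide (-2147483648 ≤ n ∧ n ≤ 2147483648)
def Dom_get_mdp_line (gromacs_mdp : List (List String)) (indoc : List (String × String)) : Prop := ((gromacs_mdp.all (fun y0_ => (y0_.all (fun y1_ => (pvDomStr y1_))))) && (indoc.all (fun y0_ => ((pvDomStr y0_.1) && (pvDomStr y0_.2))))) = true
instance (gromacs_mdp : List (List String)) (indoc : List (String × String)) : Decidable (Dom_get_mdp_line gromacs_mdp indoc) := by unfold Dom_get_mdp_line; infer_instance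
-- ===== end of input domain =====

-- B inverts the traversal: it indexes the rows by base key once, then iterates over indoc, patching the
-- indexed rows and collecting unmatched keys, instead of A's row-oriented scans against the dict (alternative);
-- both Pythons mutate the caller's matched sublists identically — the theorems are about the return value.

-- ===== PORT A =====
-- i[0][:-1].strip()
def pvKeyOf (s : String) : String := PySem.Str.strip (PySem.Str.slice s none (some (-1)))

-- "{:<23s}  =  {}".format(k, v): hand port of the format call — left-justify k with spaces to
-- width 23, then "  =  " and v; exact here (code points = characters on this ASCII domain).
def pvFmtExtra (k v : String) : String :=
  String.ofList (k.toList ++ List.replicate (23 - k.toList.length) ' ' ++ "  =  ".toList ++ v.toList)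

def get_mdp_line (gromacs_mdp : List (List String)) (indoc : List (String × String)) : String :=
  let d : PySem.Dict String String := PySem.Dict.mk indoc
  -- [i[0][:-1].strip() for i in gromacs_mdp if len(i) == 2]   (i[0] guarded by len(i) == 2, so pyGetD's default is never read)
  let base_key_list := (gromacs_mdp.filter (fun i => i.length == 2)).map
      (fun i => pvKeyOf (PySem.List.pyGetD i 0 ""))
  -- for n, i in enumerate(gromacs_mdp): if len(i) == 2 and i[0][:-1].strip() in indoc_key: gromacs_mdp[n][1] = indoc[i[0][:-1].strip()]
  let g2 := (PySem.List.enumerate gromacs_mdp).foldl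
    (fun acc p =>
      if p.2.length == 2 && d.contains (pvKeyOf (PySem.List.pyGetD p.2 0 "")) then
        PySem.List.pySetD acc p.1
          (PySem.List.pySetD p.2 1 (d.getD (pvKeyOf (PySem.List.pyGetD p.2 0 "")) ""))
      else acc) gromacs_mdp
  -- mdp_str = [[str(j) for j in i] for i in gromacs_mdp]   (str(j) on a string is the identity)
  let mdp_str := g2.map (fun i => i.map (fun j => j))
  let mdp_str2 := mdp_str.map (fun i => PySem.Str.join "  " i)
  let not_include := (d.keys.filter (fun i => !(base_key_list.contains i))).map
      (fun i => pvFmtExtra i (d.getD i ""))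
  PySem.Str.join "\n" (mdp_str2 ++ ["\n"] ++ not_include)

-- ===== PORT B =====
def get_mdp_line_alt (gromacs_mdp : List (List String)) (indoc : List (String × String)) : String :=
  let d : PySem.Dict String String := PySem.Dict.mk indoc
  -- index = {}; for n, row in enumerate(gromacs_mdp): if len(row) == 2: index.setdefault(key, []).append(n)
  -- (setdefault(k, []).append(n) is exactly  index[k] = index.get(k, []) + [n]  = Dict.modify k [] (· ++ [n]))
  let ix : PySem.Dict String (List Int) := (PySem.List.enumerate gromacs_mdp).foldl
    (fun ix p =>
      if p.2.length == 2 then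
        ix.modify (pvKeyOf (PySem.List.pyGetD p.2 0 "")) [] (fun l => l ++ [p.1])
      else ix) PySem.Dict.empty
  -- for key, val in indoc.items(): if key in index: patch the indexed rows  else: collect an extra line
  let st := d.items.foldl
    (fun (st : List (List String) × List String) kv =>
      if ix.contains kv.1 then
        ((ix.getD kv.1 []).foldl
          (fun acc n =>
            PySem.List.pySetD acc n (PySem.List.pySetD (PySem.List.pyGetD acc n []) 1 kv.2)) st.1,
         st.2)
      else (st.1, st.2 ++ [pvFmtExtra kv.1 kv.2]))
    (gromacs_mdp, ([] : List String))
  -- body = ["  ".join(str(j) for j in row) for row in gromacs_mdp]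
  let body := st.1.map (fun row => PySem.Str.join "  " (row.map (fun j => j)))
  PySem.Str.join "\n" (body ++ ["\n"] ++ st.2)

-- ===== PRECONDITION & SPEC =====
-- Pre_ admits exactly the association lists that represent a Python dict: indoc's keys are distinct.
-- (A's parameter indoc IS a Python dict, which cannot carry duplicate keys, so no Python input is excluded.)
def Pre_get_mdp_line (gromacs_mdp : List (List String)) (indoc : List (String × String)) : Prop :=
  (indoc.map Prod.fst).Nodup
instance (gromacs_mdp : List (List String)) (indoc : List (String × String)) : Decidable (Pre_get_mdp_line gromacs_mdp indoc) := by unfold Pre_get_mdp_line; infer_instance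

def pvWitness_get_mdp_line : List (List String) × (List (String × String)) :=
  ([["nsteps =", "100"], ["; comment"]], [("nsteps", "500"), ("dt", "0.002")])

def Spec_get_mdp_line (gromacs_mdp : List (List String)) (indoc : List (String × String)) (out : String) : Prop := out = get_mdp_line_alt gromacs_mdp indoc
instance (gromacs_mdp : List (List String)) (indoc : List (String × String)) (out : String) : Decidable (Spec_get_mdp_line gromacs_mdp indoc out) := by unfold Spec_get_mdp_line; infer_instance

-- ===== CLAIM (what is proved, stated in full; the proofs are below) =====
def Claim_equal_get_mdp_line : Prop := ∀ (gromacs_mdp : List (List String)) (indoc : List (String × String)), Dom_get_mdp_line gromacs_mdp indoc → Pre_get_mdp_line gromacs_mdp indoc → Spec_get_mdp_line gromacs_mdp indoc (get_mdp_line gromacs_mdp indoc)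

-- ===== LEMMAS AND PROOFS =====

-- the base key of a row
def pvRK (i : List String) : String := pvKeyOf (PySem.List.pyGetD i 0 "")

-- the per-row update both programs perform
def pvUpdRow (d : PySem.Dict String String) (i : List String) : List String :=
  if i.length == 2 && d.contains (pvRK i) then
    PySem.List.pySetD i 1 (d.getD (pvRK i) "")
  else i

-- A's base_key_list
def pvBaseKeys (g : List (List String)) : List String :=
  (g.filter (fun i => i.length == 2)).map pvRK

-- the length-2 entries of enumerate(g)
def pvPs (g : List (List String)) : List (Int × List String) :=
  (PySem.List.enumerate g).filter (fun p => p.2.length == 2)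

-- B's index dict
def pvIx (g : List (List String)) : PySem.Dict String (List Int) :=
  (PySem.List.enumerate g).foldl
    (fun ix p =>
      if p.2.length == 2 then
        ix.modify (pvKeyOf (PySem.List.pyGetD p.2 0 "")) [] (fun l => l ++ [p.1])
      else ix) PySem.Dict.empty

-- the index positions stored under key k
def pvIxL (g : List (List String)) (k : String) : List Int :=
  ((pvPs g).filter (fun p => pvRK p.2 == k)).map Prod.fst

-- one row-update instruction (position, value to write at slot 1)
def pvU (acc : List (List String)) (p : Int × String) : List (List String) :=
  PySem.List.pySetD acc p.1 (PySem.List.pySetD (PySem.List.pyGetD acc p.1 []) 1 p.2)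

-- the flattened instruction stream of B's patch loop
def pvInstrs (g : List (List String)) (d : PySem.Dict String String) : List (Int × String) :=
  d.items.flatMap (fun kv =>
    if (pvIx g).contains kv.1 then (pvIxL g kv.1).map (fun n => (n, kv.2)) else [])

-- A's enumerate-and-set-back loop is a map over the original list (offset-generalised induction)
theorem pv_foldl_enumerate_set {α : Type} (c : α → Bool) (f : α → α) :
    ∀ (t pre : List α),
      (PySem.List.enumerate t (pre.length : Int)).foldl
        (fun acc p => if c p.2 then PySem.List.pySetD acc p.1 (f p.2) else acc) (pre ++ t)
      = pre ++ t.map (fun x => if c x then f x else x) := by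
  intro t
  induction t with
  | nil => intro pre; simp [PySem.List.enumerate_nil]
  | cons x xs ih =>
    intro pre
    rw [PySem.List.enumerate_cons]
    have h1 : (if c x then PySem.List.pySetD (pre ++ x :: xs) (pre.length : Int) (f x)
                else pre ++ x :: xs)
        = (pre ++ [if c x then f x else x]) ++ xs := by
      by_cases hc : c x = true
      · simp [hc, PySem.List.pySetD_natCast]
      · simp [hc]
    have h2 : ((pre.length : Int) + 1) = ((pre ++ [if c x then f x else x]).length : Int) := by
      simp
    simp only [List.foldl_cons, h1, h2, ih (pre ++ [if c x then f x else x])]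
    simp

-- pvBaseKeys, read off the enumerate pairs
theorem pvBaseKeys_eq (g : List (List String)) :
    pvBaseKeys g = (pvPs g).map (fun p => pvRK p.2) := by
  unfold pvBaseKeys pvPs
  conv_lhs => rw [← PySem.List.map_snd_enumerate g 0]
  rw [List.filter_map, List.map_map]
  rfl

-- the generalised modify-fold characterisation behind pvIx_getD
theorem pvIx_getD_aux (k : String) : ∀ (ps : List (Int × List String)) (ix0 : PySem.Dict String (List Int)),
    (ps.foldl (fun ix p => ix.modify (pvRK p.2) [] (fun l => l ++ [p.1])) ix0).getD k []
      = ix0.getD k [] ++ (ps.filter (fun p => pvRK p.2 == k)).map Prod.fst := by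
  intro ps
  induction ps with
  | nil => intro ix0; simp
  | cons p t ih =>
    intro ix0
    by_cases hk : pvRK p.2 = k
    · subst hk
      simp only [List.foldl_cons, ih]
      rw [PySem.Dict.getD_modify_self]
      simp
    · have hne : k ≠ pvRK p.2 := fun h => hk h.symm
      simp only [List.foldl_cons, ih, List.filter_cons]
      rw [PySem.Dict.getD_modify_of_ne _ _ _ hne]
      simp [hk]

theorem pvIxFoldForm (g : List (List String)) : pvIx g = (pvPs g).foldl
    (fun ix p => ix.modify (pvRK p.2) [] (fun l => l ++ [p.1])) PySem.Dict.empty := by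
  unfold pvIx pvPs
  rw [List.foldl_filter]
  rfl

-- pvIx's stored lists, characterised
theorem pvIx_getD (g : List (List String)) (k : String) :
    (pvIx g).getD k [] = pvIxL g k := by
  rw [pvIxFoldForm, pvIx_getD_aux, pvIxL]
  simp

-- pvIx's key set is A's base-key list
theorem pvIx_contains (g : List (List String)) (k : String) :
    (pvIx g).contains k = (pvBaseKeys g).contains k := by
  rw [Bool.eq_iff_iff, PySem.Dict.contains_iff_mem_keys, List.contains_iff_mem, pvIxFoldForm]
  rw [PySem.Dict.keys_foldl_modify_key]
  rw [pvBaseKeys_eq]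
  simp [PySem.Set.mem_update]

-- membership in an index list pins the row down
theorem pvIxL_mem {g : List (List String)} {k : String} {n : Int} (h : n ∈ pvIxL g k) :
    ∃ (j : Nat) (hj : j < g.length), n = (j : Int) ∧ g[j].length = 2 ∧ pvRK g[j] = k := by
  unfold pvIxL pvPs at h
  rcases List.mem_map.mp h with ⟨p, hpf, hfst⟩
  rcases List.mem_filter.mp hpf with ⟨hps, hkey⟩
  rcases List.mem_filter.mp hps with ⟨hpe, hlen⟩
  rw [PySem.List.mem_enumerate_iff] at hpe
  rcases hpe with ⟨j, hj, hp⟩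
  subst hp
  refine ⟨j, hj, ?_, ?_, ?_⟩
  · simpa using hfst.symm
  · simpa using hlen
  · simpa using hkey

-- and conversely
theorem pvIxL_mem_of {g : List (List String)} {j : Nat} (hj : j < g.length)
    (h2 : g[j].length = 2) : (j : Int) ∈ pvIxL g (pvRK g[j]) := by
  unfold pvIxL pvPs
  apply List.mem_map.mpr
  refine ⟨((j : Int), g[j]), ?_, rfl⟩
  apply List.mem_filter.mpr
  refine ⟨?_, by simp⟩
  apply List.mem_filter.mpr
  refine ⟨?_, by simpa using h2⟩
  rw [PySem.List.mem_enumerate_iff]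
  exact ⟨j, hj, by simp⟩

-- each index list is strictly increasing, hence duplicate-free
theorem pvIxL_nodup (g : List (List String)) (k : String) : (pvIxL g k).Nodup := by
  unfold pvIxL pvPs
  have h1 : (((PySem.List.enumerate g 0).filter (fun p => p.2.length == 2)).filter
      (fun p => pvRK p.2 == k)).Pairwise (fun p q => p.1 < q.1) :=
    ((PySem.List.pairwise_lt_enumerate g 0).filter _).filter _
  have h2 := List.pairwise_map.mpr h1
  exact h2.imp (fun h => ne_of_lt h)

-- what membership in the instruction stream means
theorem pvInstrs_mem {g : List (List String)} {d : PySem.Dict String String} {p : Int × String} :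
    p ∈ pvInstrs g d ↔ ∃ kv ∈ d.items, (pvIx g).contains kv.1 = true ∧ p.1 ∈ pvIxL g kv.1 ∧ p.2 = kv.2 := by
  unfold pvInstrs
  simp only [List.mem_flatMap]
  constructor
  · rintro ⟨kv, hkv, hp⟩
    by_cases hc : (pvIx g).contains kv.1 = true
    · rw [if_pos hc] at hp
      simp only [List.mem_map] at hp
      obtain ⟨n, hn, rfl⟩ := hp
      exact ⟨kv, hkv, hc, hn, rfl⟩
    · rw [if_neg hc] at hp
      exact absurd hp (List.not_mem_nil)
  · rintro ⟨kv, hkv, hc, hn, hv⟩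
    refine ⟨kv, hkv, ?_⟩
    rw [if_pos hc]
    simp only [List.mem_map]
    exact ⟨p.1, hn, by rw [← hv]⟩

-- the instruction stream touches each position at most once (indoc's keys distinct)
theorem pvInstrs_nodup (g : List (List String)) (d : PySem.Dict String String)
    (hnd : d.keys.Nodup) : ((pvInstrs g d).map Prod.fst).Nodup := by
  have hsub : ∀ (kv : String × String) (x : Int),
      x ∈ (if (pvIx g).contains kv.1 = true then
            (pvIxL g kv.1).map (fun n => (n, kv.2)) else []).map Prod.fst →
      x ∈ pvIxL g kv.1 := by
    intro kv x hx
    by_cases hc : (pvIx g).contains kv.1 = true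
    · rw [if_pos hc] at hx
      rcases List.mem_map.mp hx with ⟨p, hp, rfl⟩
      rcases List.mem_map.mp hp with ⟨n, hn, rfl⟩
      simpa using hn
    · rw [if_neg hc] at hx
      simp at hx
  unfold pvInstrs
  rw [List.map_flatMap]
  rw [List.nodup_flatMap]
  constructor
  · intro kv _
    by_cases hc : (pvIx g).contains kv.1 = true
    · simp only [if_pos hc, List.map_map]
      have h1 : (Prod.fst ∘ fun n => (n, kv.2)) = (id : Int → Int) := rfl
      rw [h1, List.map_id]
      exact pvIxL_nodup g kv.1
    · simp only [if_neg hc]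
      simp
  · have hkeys : List.Pairwise (fun (a b : String × String) => a.1 ≠ b.1) d.items := by
      have h := hnd
      rw [PySem.Dict.keys] at h
      exact (List.pairwise_map.mp h)
    refine hkeys.imp ?_
    intro a b hab x hxa hxb
    have hma : x ∈ pvIxL g a.1 := hsub a x (by simpa using hxa)
    have hmb : x ∈ pvIxL g b.1 := hsub b x (by simpa using hxb)
    obtain ⟨j, hj, rfl, h2, hk⟩ := pvIxL_mem hma
    obtain ⟨j', hj', hjj, h2', hk'⟩ := pvIxL_mem hmb
    have hje : j = j' := by exact_mod_cast hjj
    subst hje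
    exact hab (hk ▸ hk' ▸ rfl)

-- find? on a fst-nodup list of pairs
theorem pv_find?_fst {β : Type} : ∀ {l : List (Int × β)} {m : Int} {v : β},
    (l.map Prod.fst).Nodup → (m, v) ∈ l → l.find? (fun p => p.1 == m) = some (m, v) := by
  intro l
  induction l with
  | nil => intro m v _ h; exact absurd h (List.not_mem_nil)
  | cons a t ih =>
    intro m v hnd hmem
    rw [List.map_cons, List.nodup_cons] at hnd
    by_cases ha : a.1 = m
    · have heq : (m, v) = a := by
        rcases List.mem_cons.mp hmem with h | h
        · exact h
        · exfalso
          exact hnd.1 (ha ▸ (List.mem_map.mpr ⟨(m, v), h, rfl⟩))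
      rw [List.find?_cons_of_pos (by simp [ha]), ← heq]
    · have hmem' : (m, v) ∈ t := by
        rcases List.mem_cons.mp hmem with h | h
        · exact absurd (congrArg Prod.fst h).symm ha
        · exact h
      rw [List.find?_cons_of_neg (by simp [ha])]
      exact ih hnd.2 hmem' 

-- an update fold with in-range, duplicate-free positions, read pointwise
theorem pvU_foldl_getElem? : ∀ (instrs : List (Int × String)) (acc : List (List String)),
    (∀ p ∈ instrs, 0 ≤ p.1 ∧ p.1 < (acc.length : Int)) → ((instrs.map Prod.fst).Nodup) →
    ∀ m : Nat,
      (instrs.foldl pvU acc)[m]? =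
        match instrs.find? (fun p => p.1 == (m : Int)) with
        | some p => acc[m]?.map (fun row => PySem.List.pySetD row 1 p.2)
        | none => acc[m]? := by
  intro instrs
  induction instrs with
  | nil => intro acc _ _ m; rfl
  | cons q t ih =>
    intro acc hrange hnd m
    obtain ⟨hq0, hqlt⟩ := hrange q (List.mem_cons_self)
    have hqnat : q.1 = (q.1.toNat : Int) := (Int.toNat_of_nonneg hq0).symm
    have hqlen : q.1.toNat < acc.length := by omega
    have hacc' : pvU acc q = acc.set q.1.toNat (PySem.List.pySetD acc[q.1.toNat] 1 q.2) := by
      unfold pvU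
      conv_lhs => rw [hqnat]
      rw [PySem.List.pySetD_natCast, PySem.List.pyGetD_natCast,
          List.getD_eq_getElem?_getD, List.getElem?_eq_getElem hqlen]
      rfl
    have hlen' : (pvU acc q).length = acc.length := by
      rw [hacc']; simp
    rw [List.map_cons, List.nodup_cons] at hnd
    have hrange' : ∀ p ∈ t, 0 ≤ p.1 ∧ p.1 < ((pvU acc q).length : Int) := by
      intro p hp
      rw [hlen']
      exact hrange p (List.mem_cons_of_mem _ hp)
    rw [List.foldl_cons, ih (pvU acc q) hrange' hnd.2 m]
    by_cases hm : q.1.toNat = m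
    · subst hm
      have hhead : (q.1 == (q.1.toNat : Int)) = true := by simp [← hqnat]
      have hfq : List.find? (fun p => p.1 == ((q.1.toNat : Nat) : Int)) (q :: t) = some q :=
        List.find?_cons_of_pos hhead
      rw [hfq]
      have htail : t.find? (fun p => p.1 == (q.1.toNat : Int)) = none := by
        rw [List.find?_eq_none]
        intro p hp hbeq
        apply hnd.1
        have hpq : p.1 = q.1 := by
          have := of_decide_eq_true (by simpa using hbeq)
          omega
        exact hpq ▸ (List.mem_map.mpr ⟨p, hp, rfl⟩)
      rw [htail, hacc']
      have hlt : q.1.toNat < (acc.set q.1.toNat (PySem.List.pySetD acc[q.1.toNat] 1 q.2)).length := by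
        simpa using hqlen
      rw [List.getElem?_eq_getElem hlt, List.getElem?_eq_getElem hqlen]
      simp
    · have hhead : (q.1 == (m : Int)) = false := by
        simp only [beq_eq_false_iff_ne, ne_eq]
        omega
      have hfq : List.find? (fun p => p.1 == (m : Int)) (q :: t)
          = List.find? (fun p => p.1 == (m : Int)) t :=
        List.find?_cons_of_neg (by simp [hhead])
      rw [hfq]
      have hgm : (pvU acc q)[m]? = acc[m]? := by
        rw [hacc']
        exact List.getElem?_set_ne hm
      rw [hgm]

-- B's patch loop equals the per-row map
theorem pv_rows (g : List (List String)) (d : PySem.Dict String String)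
    (hnd : d.keys.Nodup) : (pvInstrs g d).foldl pvU g = g.map (pvUpdRow d) := by
  have hrange : ∀ p ∈ pvInstrs g d, 0 ≤ p.1 ∧ p.1 < (g.length : Int) := by
    intro p hp
    obtain ⟨kv, _, _, hn, _⟩ := pvInstrs_mem.mp hp
    obtain ⟨j, hj, hpj, _, _⟩ := pvIxL_mem hn
    constructor
    · rw [hpj]; exact Int.natCast_nonneg j
    · rw [hpj]; exact_mod_cast hj
  have hnodup := pvInstrs_nodup g d hnd
  apply List.ext_getElem?
  intro m
  rw [pvU_foldl_getElem? (pvInstrs g d) g hrange hnodup m]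
  by_cases hm : m < g.length
  · by_cases hcond : g[m].length = 2 ∧ d.contains (pvRK g[m]) = true
    · obtain ⟨h2, hc⟩ := hcond
      -- the unique instruction at position m
      have hkmem : pvRK g[m] ∈ d.keys := by
        rw [← PySem.Dict.contains_iff_mem_keys]
        exact hc
      obtain ⟨kv, hkv, hfst⟩ := List.mem_map.mp (by rwa [PySem.Dict.keys] at hkmem)
      have hkv' : (kv.1, kv.2) ∈ d.items := by simpa using hkv
      have hv : d.getD kv.1 "" = kv.2 := PySem.Dict.getD_of_mem_items d hkv' hnd ""
      have hixc : (pvIx g).contains kv.1 = true := by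
        rw [pvIx_contains, List.contains_iff_mem, hfst, pvBaseKeys]
        exact List.mem_map.mpr ⟨g[m], List.mem_filter.mpr ⟨List.getElem_mem hm, by simp [h2]⟩, rfl⟩
      have hinstr : ((m : Int), kv.2) ∈ pvInstrs g d :=
        pvInstrs_mem.mpr ⟨kv, hkv, hixc, by rw [hfst]; exact pvIxL_mem_of hm h2, rfl⟩
      rw [pv_find?_fst hnodup hinstr]
      rw [List.getElem?_map, List.getElem?_eq_getElem hm]
      have hupd : pvUpdRow d g[m] = PySem.List.pySetD g[m] 1 kv.2 := by
        unfold pvUpdRow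
        rw [if_pos (by simp [h2, hc]), ← hfst, hv]
      simp [hupd]
    · have hfind : (pvInstrs g d).find? (fun p => p.1 == (m : Int)) = none := by
        rw [List.find?_eq_none]
        intro p hp hbeq
        obtain ⟨kv, hkv, _, hn, _⟩ := pvInstrs_mem.mp hp
        have hpm : p.1 = (m : Int) := by
          have := of_decide_eq_true (by simpa using hbeq)
          omega
        rw [hpm] at hn
        obtain ⟨j, hj, hjm, h2, hk⟩ := pvIxL_mem hn
        have hjem : j = m := by exact_mod_cast hjm.symm
        subst hjem
        apply hcond
        refine ⟨h2, ?_⟩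
        rw [hk, PySem.Dict.contains_iff_mem_keys, PySem.Dict.keys]
        exact List.mem_map.mpr ⟨kv, hkv, rfl⟩
      rw [hfind]
      rw [List.getElem?_map, List.getElem?_eq_getElem hm]
      have hupd : pvUpdRow d g[m] = g[m] := by
        unfold pvUpdRow
        rw [if_neg]
        intro hco
        rw [Bool.and_eq_true] at hco
        exact hcond ⟨by simpa using hco.1, hco.2⟩
      simp [hupd]
  · rw [List.getElem?_eq_none (by omega), List.getElem?_eq_none (by simpa using hm)]
    have : (pvInstrs g d).find? (fun p => p.1 == (m : Int)) = none := by
      rw [List.find?_eq_none]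
      intro p hp hbeq
      have := (hrange p hp).2
      have hpm : p.1 = (m : Int) := by
        have := of_decide_eq_true (by simpa using hbeq)
        omega
      omega
    rw [this]

-- the two ports, unfolded to plain expressions (definitional)
theorem pvA_unfold (g : List (List String)) (indoc : List (String × String)) :
    get_mdp_line g indoc =
      PySem.Str.join "\n"
        ((((PySem.List.enumerate g).foldl
            (fun acc p =>
              if p.2.length == 2 && (PySem.Dict.mk indoc).contains (pvKeyOf (PySem.List.pyGetD p.2 0 "")) then
                PySem.List.pySetD acc p.1
                  (PySem.List.pySetD p.2 1 ((PySem.Dict.mk indoc).getD (pvKeyOf (PySem.List.pyGetD p.2 0 "")) ""))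
              else acc) g).map (fun i => i.map (fun j => j))).map (fun i => PySem.Str.join "  " i)
          ++ ["\n"]
          ++ (((PySem.Dict.mk indoc).keys.filter
                (fun i => !(((g.filter (fun i => i.length == 2)).map
                    (fun i => pvKeyOf (PySem.List.pyGetD i 0 ""))).contains i))).map
              (fun i => pvFmtExtra i ((PySem.Dict.mk indoc).getD i "")))) := rfl

theorem pvB_unfold (g : List (List String)) (indoc : List (String × String)) :
    get_mdp_line_alt g indoc =
      PySem.Str.join "\n"
        ((((PySem.Dict.mk indoc).items.foldl
            (fun (st : List (List String) × List String) kv =>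
              if (pvIx g).contains kv.1 then
                (((pvIx g).getD kv.1 []).foldl
                  (fun acc n =>
                    PySem.List.pySetD acc n (PySem.List.pySetD (PySem.List.pyGetD acc n []) 1 kv.2)) st.1,
                 st.2)
              else (st.1, st.2 ++ [pvFmtExtra kv.1 kv.2]))
            (g, ([] : List String))).1.map (fun row => PySem.Str.join "  " (row.map (fun j => j))))
          ++ ["\n"]
          ++ ((PySem.Dict.mk indoc).items.foldl
            (fun (st : List (List String) × List String) kv =>
              if (pvIx g).contains kv.1 then
                (((pvIx g).getD kv.1 []).foldl
                  (fun acc n =>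
                    PySem.List.pySetD acc n (PySem.List.pySetD (PySem.List.pyGetD acc n []) 1 kv.2)) st.1,
                 st.2)
              else (st.1, st.2 ++ [pvFmtExtra kv.1 kv.2]))
            (g, ([] : List String))).2) := rfl

-- ===== VERDICT (by name: the statement is the Claim_ definition above) =====
theorem get_mdp_line_spec : Claim_equal_get_mdp_line := by
  intro g indoc _ hpre
  unfold Spec_get_mdp_line
  rw [pvA_unfold, pvB_unfold]
  set d : PySem.Dict String String := PySem.Dict.mk indoc with hd
  have hnd : d.keys.Nodup := by
    rw [hd]
    exact hpre
  -- A's update loop is the per-row map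
  have hA := pv_foldl_enumerate_set
      (fun x => x.length == 2 && d.contains (pvKeyOf (PySem.List.pyGetD x 0 "")))
      (fun x => PySem.List.pySetD x 1 (d.getD (pvKeyOf (PySem.List.pyGetD x 0 "")) ""))
      g []
  simp only [List.nil_append, List.length_nil, Nat.cast_zero] at hA
  -- B's pair fold splits into two independent folds
  have hpair : ∀ (l : List (String × String)) (a : List (List String)) (b : List String),
      l.foldl (fun (st : List (List String) × List String) kv =>
        if (pvIx g).contains kv.1 then
          (((pvIx g).getD kv.1 []).foldl
            (fun acc n =>
              PySem.List.pySetD acc n (PySem.List.pySetD (PySem.List.pyGetD acc n []) 1 kv.2)) st.1,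
           st.2)
        else (st.1, st.2 ++ [pvFmtExtra kv.1 kv.2])) (a, b)
      = (l.foldl (fun a kv =>
            if (pvIx g).contains kv.1 then
              ((pvIx g).getD kv.1 []).foldl
                (fun acc n =>
                  PySem.List.pySetD acc n (PySem.List.pySetD (PySem.List.pyGetD acc n []) 1 kv.2)) a
            else a) a,
         l.foldl (fun b kv =>
            if (pvIx g).contains kv.1 then b else b ++ [pvFmtExtra kv.1 kv.2]) b) := by
    intro l
    induction l with
    | nil => intro a b; rfl
    | cons kv t ih =>
      intro a b
      by_cases hc : (pvIx g).contains kv.1 = true <;> simp [hc, ih]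
  rw [hpair]
  -- first component: B's patch loop = per-row map
  have hrows : d.items.foldl
      (fun a kv =>
        if (pvIx g).contains kv.1 then
          ((pvIx g).getD kv.1 []).foldl
            (fun acc n =>
              PySem.List.pySetD acc n (PySem.List.pySetD (PySem.List.pyGetD acc n []) 1 kv.2)) a
        else a) g
      = g.map (pvUpdRow d) := by
    have hstep : (fun (a : List (List String)) (kv : String × String) =>
        if (pvIx g).contains kv.1 then
          ((pvIx g).getD kv.1 []).foldl
            (fun acc n =>
              PySem.List.pySetD acc n (PySem.List.pySetD (PySem.List.pyGetD acc n []) 1 kv.2)) a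
        else a)
        = (fun a kv =>
            (if (pvIx g).contains kv.1 then (pvIxL g kv.1).map (fun n => (n, kv.2)) else []).foldl
              pvU a) := by
      funext a kv
      by_cases hc : (pvIx g).contains kv.1 = true
      · rw [if_pos hc, if_pos hc, pvIx_getD, List.foldl_map]
        rfl
      · rw [if_neg hc, if_neg hc]
        rfl
    rw [hstep, ← List.foldl_flatMap]
    exact pv_rows g d hnd
  -- second component: B's extras loop = A's not_include
  have hextras : d.items.foldl
      (fun b kv => if (pvIx g).contains kv.1 then b else b ++ [pvFmtExtra kv.1 kv.2])
      ([] : List String)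
      = ((d.keys.filter (fun i => !((pvBaseKeys g).contains i))).map
          (fun i => pvFmtExtra i (d.getD i ""))) := by
    have hstep : (fun (b : List String) (kv : String × String) =>
        if (pvIx g).contains kv.1 then b else b ++ [pvFmtExtra kv.1 kv.2])
        = (fun b kv =>
            if !((pvIx g).contains kv.1) then b ++ [pvFmtExtra kv.1 kv.2] else b) := by
      funext b kv
      by_cases hc : (pvIx g).contains kv.1 = true <;> simp [hc]
    rw [hstep, PySem.List.foldl_append_if, List.nil_append]
    rw [PySem.Dict.items_eq_map_keys d hnd ""]
    rw [List.filter_map, List.map_map]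
    have hpred : ((fun (kv : String × String) => !((pvIx g).contains kv.1)) ∘
        (fun k => (k, d.getD k ""))) = (fun k => !((pvBaseKeys g).contains k)) := by
      funext k
      simp [pvIx_contains]
    rw [hpred]
    rfl
  rw [hA]
  have hmap : (fun (x : List String) =>
      if x.length == 2 && d.contains (pvKeyOf (PySem.List.pyGetD x 0 "")) then
        PySem.List.pySetD x 1 (d.getD (pvKeyOf (PySem.List.pyGetD x 0 "")) "")
      else x) = pvUpdRow d := by
    funext x
    rfl
  rw [hmap]
  simp only [hrows, hextras]
  simp only [List.map_map, pvBaseKeys]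
  rfl
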